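-- pv_equiv track=rewrite | github.com/jpma-fernandes/BIOINF_1 | crossover.py | index_at_residue
-- ===== SOURCE A (Python) =====
-- def index_at_residue(seq, n):
--     """
--     Retorna o índice (0-based) da primeira posição
--     à direita do n-ésimo resíduo (ignorando gaps).
--     """
--     count = 0
--     for i, c in enumerate(seq):
--         if c != '-':
--             count += 1
--         if count == n:
--             return i + 1  # posição depois do n-ésimo resíduo
--     return len(seq)
-- ===== SOURCE B (Python) =====
-- def index_at_residue(seq, n):
--     # Two-pass: materialize a prefix-count table, then search it.
--     counts = []
--     total = 0
--     for c in seq: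
--         if c != '-':
--             total += 1
--         counts.append(total)
--     for i, cnt in enumerate(counts):
--         if cnt == n:
--             return i + 1
--     return len(seq)
-- ===== Notes on version B (the rewrite author's own statement) =====
-- stated objective: alternative
-- what changed: Replaces the single counting loop with early return by two separate passes: first materialize a prefix-count table of non-gap residues, then scan that table for the first index whose count equals n.
import Mathlib
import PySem

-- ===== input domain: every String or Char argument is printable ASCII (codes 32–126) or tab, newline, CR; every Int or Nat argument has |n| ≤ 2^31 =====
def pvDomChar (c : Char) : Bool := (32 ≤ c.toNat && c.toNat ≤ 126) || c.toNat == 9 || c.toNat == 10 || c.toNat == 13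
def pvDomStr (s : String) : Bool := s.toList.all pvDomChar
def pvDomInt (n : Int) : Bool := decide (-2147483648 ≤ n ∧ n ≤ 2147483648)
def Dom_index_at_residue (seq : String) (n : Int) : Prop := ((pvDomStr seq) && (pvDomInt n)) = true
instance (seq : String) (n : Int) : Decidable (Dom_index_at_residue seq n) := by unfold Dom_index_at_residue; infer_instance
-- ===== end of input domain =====

-- B (alternative, same cost): replaces A's single counting loop with two passes — materialize a prefix-count table, then scan it for the first index whose count equals n.


-- ===== PORT A =====
-- Loop of A: enumerate chars with index i and running count; return i+1 when count == n.
def pvLoopA (n : Int) : List Char → Int → Int → Int → Int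
  | [], _, _, len => len
  | c :: cs, i, count, len =>
    let count' := if c ≠ '-' then count + 1 else count
    if count' = n then i + 1 else pvLoopA n cs (i + 1) count' len

def index_at_residue (seq : String) (n : Int) : Int :=
  pvLoopA n seq.toList 0 0 (seq.toList.length : Int)

-- ===== PORT B =====
-- Pass 1 of B: prefix counts of non-gap residues.
def pvCounts : List Char → Int → List Int
  | [], _ => []
  | c :: cs, total =>
    let t := if c ≠ '-' then total + 1 else total
    t :: pvCounts cs t

-- Pass 2 of B: first index whose count equals n, returning i+1, else len.
def pvSearch (n : Int) : List Int → Int → Int → Int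
  | [], _, len => len
  | x :: xs, i, len => if x = n then i + 1 else pvSearch n xs (i + 1) len

def index_at_residue_alt (seq : String) (n : Int) : Int :=
  pvSearch n (pvCounts seq.toList 0) 0 (seq.toList.length : Int)

-- ===== PRECONDITION & SPEC =====
def Spec_index_at_residue (seq : String) (n : Int) (out : Int) : Prop := out = index_at_residue_alt seq n
instance (seq : String) (n : Int) (out : Int) : Decidable (Spec_index_at_residue seq n out) := by unfold Spec_index_at_residue; infer_instance

-- ===== CLAIM (what is proved, stated in full; the proofs are below) =====
def Claim_equal_index_at_residue : Prop := ∀ (seq : String) (n : Int), Dom_index_at_residue seq n → Spec_index_at_residue seq n (index_at_residue seq n)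

-- ===== LEMMAS AND PROOFS =====

-- ===== VERDICT (by name: the statement is the Claim_ definition above) =====
theorem pvLoop_eq_search (n : Int) (cs : List Char) :
    ∀ (i count len : Int), pvLoopA n cs i count len = pvSearch n (pvCounts cs count) i len := by
  induction cs with
  | nil => intro i count len; rfl
  | cons c cs ih =>
    intro i count len
    simp only [pvLoopA, pvCounts, pvSearch]
    split <;> split
    · rfl
    · exact ih (i + 1) _ len
    · rfl
    · exact ih (i + 1) _ len

theorem index_at_residue_spec : Claim_equal_index_at_residue := by
  intro seq n _
  unfold Spec_index_at_residue index_at_residue index_at_residue_alt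
  exact pvLoop_eq_search n seq.toList 0 0 _
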